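-- pv_equiv track=rewrite | github.com/robthomson/rotorflight-lua-ethos-suite | bin/menu/generate.py | ordered_items
-- ===== SOURCE A (Python) =====
-- from typing import Any, Iterable
--
-- ROOT_KEY_ORDER = ("sections", "menus")
--
-- def ordered_items(obj: dict[str, Any], path: tuple[str, ...]) -> Iterable[tuple[str, Any]]:
--     if path != ():
--         return obj.items()
--
--     taken = set()
--     ordered: list[tuple[str, Any]] = []
--     for key in ROOT_KEY_ORDER:
--         if key in obj:
--             ordered.append((key, obj[key]))
--             taken.add(key)
--     for key, value in obj.items():
--         if key not in taken:
--             ordered.append((key, value))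
--     return ordered
-- ===== SOURCE B (Python) =====
-- from typing import Any, Iterable
--
-- ROOT_KEY_ORDER = ("sections", "menus")
--
-- def ordered_items(obj: "dict[str, Any]", path: "tuple[str, ...]") -> "Iterable[tuple[str, Any]]":
--     if path != ():
--         return obj.items()
--     return sorted(
--         obj.items(),
--         key=lambda kv: ROOT_KEY_ORDER.index(kv[0]) if kv[0] in ROOT_KEY_ORDER else len(ROOT_KEY_ORDER),
--     )
-- ===== Notes on version B (the rewrite author's own statement) =====
-- stated objective: simpler
-- what changed: The two-pass partition (collect present ROOT_KEY_ORDER keys into a taken-set, then scan items skipping taken keys) is replaced by one stable sort of obj.items() by root-key rank.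
import Mathlib
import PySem

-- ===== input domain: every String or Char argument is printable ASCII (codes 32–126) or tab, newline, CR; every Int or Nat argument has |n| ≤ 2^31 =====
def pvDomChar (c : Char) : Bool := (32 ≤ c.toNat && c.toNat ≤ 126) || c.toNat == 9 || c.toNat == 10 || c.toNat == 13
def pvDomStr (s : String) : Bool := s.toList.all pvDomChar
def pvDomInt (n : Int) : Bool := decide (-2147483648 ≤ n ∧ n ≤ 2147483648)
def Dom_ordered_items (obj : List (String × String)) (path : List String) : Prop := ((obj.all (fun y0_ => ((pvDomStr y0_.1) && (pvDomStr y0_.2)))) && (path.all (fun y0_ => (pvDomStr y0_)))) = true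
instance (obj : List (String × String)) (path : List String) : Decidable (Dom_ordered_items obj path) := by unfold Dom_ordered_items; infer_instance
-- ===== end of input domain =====

-- B replaces A's two-pass partition (taken-set + rescan) by one stable sort by root-key rank: simpler, not faster.

-- ===== PORT A =====
def ROOT_KEY_ORDER : List String := ["sections", "menus"]

def ordered_items (obj : List (String × String)) (path : List String) : List (String × String) :=
  if path ≠ [] then obj
  else
    -- for key in ROOT_KEY_ORDER: if key in obj: ordered.append((key, obj[key])); taken.add(key)
    let st : PySem.Set String × List (String × String) :=
      ROOT_KEY_ORDER.foldl (fun st key =>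
        match PySem.Dict.get? ⟨obj⟩ key with
        | some v => (st.1.add key, st.2 ++ [(key, v)])
        | none => st) (PySem.Set.empty, [])
    -- for key, value in obj.items(): if key not in taken: ordered.append((key, value))
    obj.foldl (fun ordered kv => if !(st.1.contains kv.1) then ordered ++ [kv] else ordered) st.2

-- ===== PORT B =====
-- ROOT_KEY_ORDER.index(k) if k in ROOT_KEY_ORDER else len(ROOT_KEY_ORDER)
def pvRank (k : String) : Nat :=
  if (ROOT_KEY_ORDER.contains k) then
    match PySem.List.index? ROOT_KEY_ORDER k with
    | some i => i
    | none => ROOT_KEY_ORDER.length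
  else ROOT_KEY_ORDER.length

def ordered_items_alt (obj : List (String × String)) (path : List String) : List (String × String) :=
  if path ≠ [] then obj
  else PySem.List.sorted obj (fun kv => pvRank kv.1) false

-- ===== PRECONDITION & SPEC =====
-- Pre_ excludes association lists with duplicate keys: they do not denote a Python dict
-- (dict construction collapses duplicates before either program runs), so the assoc-list
-- corner is a representation artefact on which the two ports legitimately disagree.
def Pre_ordered_items (obj : List (String × String)) (path : List String) : Prop :=
  (obj.map Prod.fst).Nodup
instance (obj : List (String × String)) (path : List String) : Decidable (Pre_ordered_items obj path) := by unfold Pre_ordered_items; infer_instance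

def pvWitness_ordered_items : (List (String × String)) × List String :=
  ([("a", "1"), ("menus", "2"), ("sections", "3")], [])

def Spec_ordered_items (obj : List (String × String)) (path : List String) (out : List (String × String)) : Prop := out = ordered_items_alt obj path
instance (obj : List (String × String)) (path : List String) (out : List (String × String)) : Decidable (Spec_ordered_items obj path out) := by unfold Spec_ordered_items; infer_instance

-- ===== CLAIM (what is proved, stated in full; the proofs are below) =====
def Claim_equal_ordered_items : Prop := ∀ (obj : List (String × String)) (path : List String), Dom_ordered_items obj path → Pre_ordered_items obj path → Spec_ordered_items obj path (ordered_items obj path)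

-- ===== LEMMAS AND PROOFS =====

theorem pvRank_eq (k : String) :
    pvRank k = if k = "sections" then 0 else if k = "menus" then 1 else 2 := by
  by_cases h1 : k = "sections"
  · subst h1; decide
  · by_cases h2 : k = "menus"
    · subst h2; decide
    · simp [pvRank, ROOT_KEY_ORDER, h1, h2]

theorem pvInsertBy_mid (before : (String × String) → (String × String) → Bool)
    (x : String × String) (u v : List (String × String))
    (hu : ∀ a ∈ u, before x a = false) (hv : ∀ b ∈ v, before x b = true) :
    PySem.List.insertBy before x (u ++ v) = u ++ x :: v := by
  induction u with
  | nil =>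
    cases v with
    | nil => rfl
    | cons b bs => simp [PySem.List.insertBy, hv b (by simp)]
  | cons a as ih =>
    have ha := hu a (by simp)
    simp [PySem.List.insertBy, ha, ih (fun a h => hu a (by simp [h]))]

theorem pvSorted_rank (l : List (String × String)) :
    PySem.List.sorted l (fun kv => pvRank kv.1) false =
      l.filter (fun kv => pvRank kv.1 == 0) ++ l.filter (fun kv => pvRank kv.1 == 1)
        ++ l.filter (fun kv => pvRank kv.1 == 2) := by
  rw [PySem.List.sorted_eq_foldl_insertBy]
  induction l using List.reverseRecOn with
  | nil => rfl
  | append_singleton l x ih =>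
    rw [List.foldl_append, List.foldl_cons, List.foldl_nil, ih]
    have hrank : ∀ kv : String × String, pvRank kv.1 = 0 ∨ pvRank kv.1 = 1 ∨ pvRank kv.1 = 2 := by
      intro kv; rw [pvRank_eq]; split_ifs <;> simp
    have hmem : ∀ (i : Nat) (a : String × String),
        a ∈ l.filter (fun kv => pvRank kv.1 == i) → pvRank a.1 = i := by
      intro i a h
      simpa using (List.of_mem_filter h)
    rcases hrank x with hx | hx | hx
    · rw [List.append_assoc,
        pvInsertBy_mid _ x _ _ (by intro a ha; simp [hmem _ _ ha, hx])
          (by intro b hb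
              simp only [List.mem_append] at hb
              rcases hb with hb | hb <;> simp [hmem _ _ hb, hx])]
      simp [List.filter_append, hx]
    · rw [pvInsertBy_mid _ x _ _
          (by intro a ha
              simp only [List.mem_append] at ha
              rcases ha with ha | ha <;> simp [hmem _ _ ha, hx])
          (by intro b hb; simp [hmem _ _ hb, hx])]
      simp [List.filter_append, hx]
    · rw [PySem.List.insertBy_of_forall_not_before _ x _
          (by intro a ha
              simp only [List.append_assoc, List.mem_append] at ha
              rcases ha with ha | ha | ha <;> simp [hmem _ _ ha, hx]
              )]
      simp [List.filter_append, hx]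

-- with distinct keys, the filter by one key is exactly the first-match lookup
theorem pvFilter_find (l : List (String × String)) (k : String)
    (h : (l.map Prod.fst).Nodup) :
    l.filter (fun kv => kv.1 == k) =
      match PySem.Dict.get? ⟨l⟩ k with
      | some v => [(k, v)]
      | none => [] := by
  induction l with
  | nil => rfl
  | cons a as ih =>
    simp only [List.map_cons, List.nodup_cons] at h
    simp only [PySem.Dict.get?] at ih ⊢
    by_cases hk : a.1 = k
    · have hnil : as.filter (fun kv => kv.1 == k) = [] := by
        apply List.filter_eq_nil_iff.mpr
        intro b hb
        simp only [beq_iff_eq]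
        intro hbk
        exact h.1 (by rw [hk, ← hbk]; exact List.mem_map_of_mem hb)
      rw [List.filter_cons_of_pos (by simp [hk]), hnil,
        List.find?_cons_of_pos (by simp [hk])]
      simp [← hk]
    · rw [List.filter_cons_of_neg (by simp [hk]),
        List.find?_cons_of_neg (by simp [hk])]
      exact ih h.2

theorem pvGet_none_not_key (l : List (String × String)) (k : String)
    (h : PySem.Dict.get? ⟨l⟩ k = none) : ∀ kv ∈ l, kv.1 ≠ k := by
  intro kv hkv
  simp only [PySem.Dict.get?, Option.map_eq_none_iff, List.find?_eq_none] at h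
  simpa using h kv hkv

theorem ordered_items_root (obj : List (String × String))
    (h : (obj.map Prod.fst).Nodup) :
    ordered_items obj [] = ordered_items_alt obj [] := by
  have e0 := pvFilter_find obj "sections" h
  have e1 := pvFilter_find obj "menus" h
  unfold ordered_items ordered_items_alt
  rw [pvSorted_rank]
  simp only [ne_eq, not_true_eq_false, if_false, ROOT_KEY_ORDER, List.foldl_cons, List.foldl_nil]
  have r0 : ∀ kv : String × String, (pvRank kv.1 == 0) = (kv.1 == "sections") := by
    intro kv
    rw [pvRank_eq]
    by_cases h1 : kv.1 = "sections" <;> by_cases h2 : kv.1 = "menus" <;> simp [h1, h2]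
  have r1 : ∀ kv : String × String, (pvRank kv.1 == 1) = (kv.1 == "menus") := by
    intro kv
    rw [pvRank_eq]
    by_cases h1 : kv.1 = "sections" <;> by_cases h2 : kv.1 = "menus" <;> simp [h1, h2]
  rw [List.filter_congr (fun kv _ => r0 kv), List.filter_congr (fun kv _ => r1 kv), e0, e1]
  have hf : ∀ (t : PySem.Set String) (init : List (String × String)),
      obj.foldl (fun ordered kv => if !(t.contains kv.1) then ordered ++ [kv] else ordered) init
        = init ++ (obj.filter (fun kv => !(t.contains kv.1))).map id :=
    fun t init => PySem.List.foldl_append_if (fun kv => !(t.contains kv.1)) id obj init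
  obtain hs | ⟨vs, hs⟩ := Option.eq_none_or_eq_some (PySem.Dict.get? ⟨obj⟩ "sections") <;>
    obtain hm | ⟨vm, hm⟩ := Option.eq_none_or_eq_some (PySem.Dict.get? ⟨obj⟩ "menus") <;>
    simp only [hs, hm] <;> rw [hf] <;> simp only [List.map_id]
  · -- neither key present
    have hns := pvGet_none_not_key obj "sections" hs
    have hnm := pvGet_none_not_key obj "menus" hm
    simp only [List.nil_append, List.append_nil]
    refine List.filter_congr ?_
    intro kv hkv
    rw [pvRank_eq]
    simp [PySem.Set.empty, hns kv hkv, hnm kv hkv]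
  · -- only "menus" present
    have hns := pvGet_none_not_key obj "sections" hs
    simp only [List.nil_append]
    refine congrArg _ (List.filter_congr ?_)
    intro kv hkv
    rw [pvRank_eq]
    by_cases h2 : kv.1 = "menus" <;>
      simp [PySem.Set.empty, PySem.Set.add, hns kv hkv, h2]
  · -- only "sections" present
    have hnm := pvGet_none_not_key obj "menus" hm
    simp only [List.nil_append, List.append_nil]
    refine congrArg _ (List.filter_congr ?_)
    intro kv hkv
    rw [pvRank_eq]
    by_cases h1 : kv.1 = "sections" <;>
      simp [PySem.Set.empty, PySem.Set.add, hnm kv hkv, h1]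
  · -- both present
    simp only [List.nil_append, List.singleton_append]
    refine congrArg _ (List.filter_congr ?_)
    intro kv hkv
    rw [pvRank_eq]
    by_cases h1 : kv.1 = "sections" <;> by_cases h2 : kv.1 = "menus" <;>
      simp [PySem.Set.empty, PySem.Set.add, h1, h2]

-- ===== VERDICT (by name: the statement is the Claim_ definition above) =====
theorem ordered_items_spec : Claim_equal_ordered_items := by
  intro obj path _ hpre
  unfold Spec_ordered_items
  cases path with
  | nil => exact ordered_items_root obj hpre
  | cons p ps => simp [ordered_items, ordered_items_alt]
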